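-- pv_equiv track=rewrite | github.com/eshun4/FundamentalCodingInterviewPrep | 05/reverese_in_chunks_k.py | solution
-- ===== SOURCE A (Python) =====
-- def solution(numbers, k):
--     # TODO: implement the solution here
--     result = []
--     def reverse(numbers):
--         reversed = []
--         for i in range(len(numbers) - 1, -1, -1):
--             reversed.append(numbers[i])
--         return reversed
--
--     for i in range(0, len(numbers), k):
--         chunk = numbers[i:i + k]
--         result.extend(reverse(chunk))
--     return result
-- ===== SOURCE B (Python) =====
-- def solution(numbers, k):
--     # Flat index formula: each output position i takes the element at the
--     # mirrored position within its own chunk [start, end).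
--     n = len(numbers)
--     out = []
--     for i in range(n):
--         start = i - i % k
--         end = min(start + k, n)
--         out.append(numbers[end - 1 - (i - start)])
--     return out
-- ===== Notes on version B (the rewrite author's own statement) =====
-- stated objective: alternative
-- what changed: B replaces A's chunk-slice loop with a reverse helper by a single flat loop over output indices that computes each element's mirrored within-chunk position arithmetically (start = i - i % k, end = min(start+k, n)), building no chunks and no helper.
-- outside the precondition, e.g. on solution([1, 2], -1): A returns [], B returns [1, 2]; on solution([1], 0): A raises ValueError, B raises ZeroDivisionError
-- crash fix: For numbers == [] and k == 0, A raises ValueError (range() arg 3 must not be zero) while B returns []. — e.g. on solution([], 0): A raises ValueError, B returns []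
import Mathlib
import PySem

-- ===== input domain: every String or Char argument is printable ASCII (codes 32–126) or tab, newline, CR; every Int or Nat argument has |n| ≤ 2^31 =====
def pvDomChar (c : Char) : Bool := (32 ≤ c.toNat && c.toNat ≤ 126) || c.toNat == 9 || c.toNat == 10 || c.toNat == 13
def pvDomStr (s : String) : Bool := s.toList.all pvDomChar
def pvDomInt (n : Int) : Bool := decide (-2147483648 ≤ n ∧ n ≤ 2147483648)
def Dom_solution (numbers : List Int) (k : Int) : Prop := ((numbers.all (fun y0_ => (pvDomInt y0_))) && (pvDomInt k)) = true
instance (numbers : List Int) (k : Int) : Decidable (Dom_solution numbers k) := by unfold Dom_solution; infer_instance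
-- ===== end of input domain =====

-- B replaces A's chunk-slice-and-reverse loop by one flat loop over the output indices that
-- computes each element's mirrored position within its chunk arithmetically (alternative
-- decomposition, same O(n) cost).

-- ===== PORT A =====
-- nested helper 'reverse' of A: appends numbers[i] for i in range(len(numbers)-1, -1, -1)
def solutionRev (numbers : List Int) : List Int :=
  (PySem.List.pyRange ((numbers.length : Int) - 1) (-1) (-1)).foldl
    (fun reversed i => reversed ++ [PySem.List.pyGetD numbers i 0]) []

def solution (numbers : List Int) (k : Int) : List Int :=
  (PySem.List.pyRange 0 (numbers.length : Int) k).foldl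
    (fun result i => result ++ solutionRev (PySem.List.slice numbers (some i) (some (i + k)))) []

-- ===== PORT B =====
def solution_alt (numbers : List Int) (k : Int) : List Int :=
  (PySem.List.pyRange 0 (numbers.length : Int) 1).foldl
    (fun out i =>
      let start := i - PySem.Int.mod i k
      let e := min (start + k) (numbers.length : Int)
      out ++ [PySem.List.pyGetD numbers (e - 1 - (i - start)) 0]) []

-- ===== PRECONDITION & SPEC =====
-- Pre_ excludes k ≤ 0 (keeping empty numbers with k ≠ 0, where both return []): for k = 0
-- A raises ValueError (range step 0), and for negative k A's [] is an artefact of range's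
-- stepping rule while B returns a different value there.
def Pre_solution (numbers : List Int) (k : Int) : Prop := 1 ≤ k ∨ (numbers = [] ∧ k ≠ 0)
instance (numbers : List Int) (k : Int) : Decidable (Pre_solution numbers k) := by unfold Pre_solution; infer_instance
def pvWitness_solution : List Int × Int := ([1, 2, 3, 4, 5], 2)

-- For numbers == [] and k == 0 A raises ValueError (range() arg 3 must not be zero) while B returns [].
def Raises_solution (numbers : List Int) (k : Int) : Prop := numbers = [] ∧ k = 0
instance (numbers : List Int) (k : Int) : Decidable (Raises_solution numbers k) := by unfold Raises_solution; infer_instance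
def pvRaiseWitness_solution : List Int × Int := ([], 0)
def pvRaiseWitnessOut_solution : List Int := []

def Spec_solution (numbers : List Int) (k : Int) (out : List Int) : Prop := out = solution_alt numbers k
instance (numbers : List Int) (k : Int) (out : List Int) : Decidable (Spec_solution numbers k out) := by unfold Spec_solution; infer_instance

-- ===== CLAIM (what is proved, stated in full; the proofs are below) =====
def Claim_equal_solution : Prop := ∀ (numbers : List Int) (k : Int), Dom_solution numbers k → Pre_solution numbers k → Spec_solution numbers k (solution numbers k)
def Claim_raises_solution : Prop := (∀ (numbers : List Int) (k : Int), Dom_solution numbers k → Raises_solution numbers k → ¬ Pre_solution numbers k) ∧ (Dom_solution (pvRaiseWitness_solution.1) (pvRaiseWitness_solution.2) ∧ Raises_solution (pvRaiseWitness_solution.1) (pvRaiseWitness_solution.2) ∧ solution_alt (pvRaiseWitness_solution.1) (pvRaiseWitness_solution.2) = pvRaiseWitnessOut_solution)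

-- ===== LEMMAS AND PROOFS =====

-- B's per-index element formula, lifted out so the fold can be stated as a map
def gB (xs : List Int) (k : Int) (i : Int) : Int :=
  PySem.List.pyGetD xs
    (min (i - PySem.Int.mod i k + k) (xs.length : Int) - 1 - (i - (i - PySem.Int.mod i k))) 0

-- A's helper 'reverse' is List.reverse
lemma solutionRev_eq (xs : List Int) : solutionRev xs = xs.reverse := by
  unfold solutionRev
  rw [PySem.List.foldl_append_singleton_eq_map]
  rcases Nat.eq_zero_or_pos xs.length with hlen | hlen
  · have : xs = [] := List.eq_nil_of_length_eq_zero hlen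
    subst this
    decide
  · have hcount : PySem.List.pyRange ((xs.length : Int) - 1) (-1) (-1)
        = (List.range xs.length).map (fun j : Nat => (xs.length : Int) - 1 - (j : Int)) := by
      simp only [PySem.List.pyRange]
      rw [if_neg (by norm_num), if_neg (by norm_num),
        if_pos (by omega : (-1 : Int) < (xs.length : Int) - 1)]
      have h1 : ((xs.length : Int) - 1 - -1 + - -1 - 1) / - -1 = (xs.length : Int) := by
        norm_num
      rw [h1, Int.toNat_natCast]
      apply List.map_congr_left
      intro a _
      ring
    rw [hcount, List.map_map]
    apply List.ext_getElem
    · simp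
    · intro i hi hi'
      simp only [List.nil_append, List.getElem_map, List.getElem_range, Function.comp_apply]
      have hi2 : i < xs.length := by simpa using hi
      have hcast : (xs.length : Int) - 1 - (i : Int) = ((xs.length - 1 - i : Nat) : Int) := by
        omega
      rw [hcast, PySem.List.pyGetD_natCast, List.getD_eq_getElem _ _ (by omega),
        List.getElem_reverse]

lemma solution_nil (k : Int) : solution [] k = [] := by
  simp only [solution, List.length_nil, Nat.cast_zero, PySem.List.pyRange]
  split
  · simp
  · split_ifs <;> simp_all

lemma solution_alt_nil (k : Int) : solution_alt [] k = [] := by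
  simp [solution_alt, PySem.List.pyRange]

-- A as a flatMap of reversed chunks
lemma solution_flat (xs : List Int) (k : Int) :
    solution xs k = (PySem.List.pyRange 0 (xs.length : Int) k).flatMap
      (fun i => (PySem.List.slice xs (some i) (some (i + k))).reverse) := by
  unfold solution
  rw [PySem.List.foldl_append_eq_flatMap]
  simp [solutionRev_eq]

-- ceiling-count split for A's chunk loop
lemma count_split (len kn : Nat) (hk : 0 < kn) (hlen : 0 < len) :
    (((len : Int) - 0 + kn - 1) / kn).toNat
      = (if (0 : Int) < ((len - kn : Nat) : Int)
          then ((((len - kn : Nat) : Int) - 0 + kn - 1) / kn).toNat else 0) + 1 := by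
  have hk' : (0 : Int) < (kn : Int) := by exact_mod_cast hk
  have hstep : ((len : Int) - 0 + kn - 1) / kn = ((len : Int) - 1) / kn + 1 := by
    have h := Int.add_mul_ediv_right ((len : Int) - 1) 1 (by omega : (kn : Int) ≠ 0)
    have harg : (len : Int) - 0 + kn - 1 = (len : Int) - 1 + 1 * kn := by ring
    rw [harg, h]
  by_cases h : kn < len
  · have hd : ((len - kn : Nat) : Int) = (len : Int) - kn := by omega
    rw [if_pos (by omega : (0 : Int) < ((len - kn : Nat) : Int))]
    have harg2 : ((len - kn : Nat) : Int) - 0 + kn - 1 = (len : Int) - 1 := by omega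
    rw [harg2, hstep]
    have hq : 0 ≤ ((len : Int) - 1) / kn := Int.ediv_nonneg (by omega) (by omega)
    omega
  · have hd : (len - kn : Nat) = 0 := by omega
    rw [hd]
    rw [if_neg (by norm_num)]
    have hz : ((len : Int) - 1) / kn = 0 := Int.ediv_eq_zero_of_lt (by omega) (by omega)
    rw [hstep, hz]
    decide

-- shifting a chunk slice across a dropped first chunk
lemma slice_chunk_shift (xs : List Int) (kn c : Nat) :
    PySem.List.slice xs (some ((kn : Int) * ((c : Int) + 1))) (some ((kn : Int) * ((c : Int) + 1) + kn))
      = PySem.List.slice (xs.drop kn) (some ((kn : Int) * (c : Int))) (some ((kn : Int) * (c : Int) + kn)) := by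
  have h1 : (kn : Int) * ((c : Int) + 1) = ((kn * (c + 1) : Nat) : Int) := by push_cast; ring
  have h2 : (kn : Int) * (c : Int) = ((kn * c : Nat) : Int) := by push_cast; ring
  rw [h1, h2, PySem.List.slice_natCast_add, PySem.List.slice_natCast_add, List.drop_drop]
  congr 2
  ring

-- one chunk step of A
lemma solution_step (kn : Nat) (hk : 0 < kn) (xs : List Int) (hxs : xs ≠ []) :
    solution xs (kn : Int) = (xs.take kn).reverse ++ solution (xs.drop kn) (kn : Int) := by
  have hk' : (0 : Int) < (kn : Int) := by exact_mod_cast hk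
  have hlen : 0 < xs.length := List.length_pos_iff.mpr hxs
  rw [solution_flat, solution_flat,
    PySem.List.pyRange_of_pos 0 (xs.length : Int) hk',
    PySem.List.pyRange_of_pos 0 ((xs.drop kn).length : Int) hk']
  rw [if_pos (by exact_mod_cast hlen : (0 : Int) < (xs.length : Int))]
  have hdl : ((xs.drop kn).length : Int) = ((xs.length - kn : Nat) : Int) := by
    simp [List.length_drop]
  rw [hdl]
  have hz : (0 : Int) - 0 = 0 := by ring
  rw [count_split xs.length kn hk hlen, List.range_succ_eq_map]
  simp only [List.map_cons, List.flatMap_cons, List.flatMap_map, List.map_map]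
  congr 1
  · -- head chunk = (xs.take kn).reverse
    have h0 : (0 : Int) + (kn : Int) * ((0 : Nat) : Int) = 0 := by simp
    rw [h0]
    have hsl : PySem.List.slice xs (some 0) (some (0 + (kn : Int))) = xs.take kn := by
      rw [PySem.List.slice_zero_start]
      have h2 : (0 : Int) + (kn : Int) = ((kn : Nat) : Int) := by simp
      rw [h2, PySem.List.slice_to_natCast]
    rw [hsl]
  · -- remaining chunks
    congr 1
    funext c
    congr 1
    simp only [Function.comp_apply, Nat.succ_eq_add_one]
    have hL : (0 : Int) + (kn : Int) * (((c + 1 : Nat)) : Int) = (kn : Int) * ((c : Int) + 1) := by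
      push_cast; ring
    have hR : (0 : Int) + (kn : Int) * ((c : Nat) : Int) = (kn : Int) * (c : Int) := by ring
    rw [hL, hR, slice_chunk_shift]

-- B as a map of the per-index formula
lemma alt_eq_map (xs : List Int) (k : Int) :
    solution_alt xs k = (List.range xs.length).map (fun j : Nat => gB xs k (j : Int)) := by
  show (PySem.List.pyRange 0 (xs.length : Int) 1).foldl
      (fun out i => out ++ [gB xs k i]) [] = _
  rw [PySem.List.foldl_append_singleton_eq_map, PySem.List.pyRange_zero_nat, List.map_map]
  simp [Function.comp_def]

-- within the first chunk, B picks the mirrored element of take kn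
lemma gB_small (xs : List Int) (kn : Nat) (hk : 0 < kn) (j : Nat) (hj : j < min kn xs.length) :
    gB xs (kn : Int) (j : Int) = xs.getD (min kn xs.length - 1 - j) 0 := by
  have hk' : (0 : Int) < (kn : Int) := by exact_mod_cast hk
  have hmod : PySem.Int.mod (j : Int) (kn : Int) = (j : Int) := by
    rw [PySem.Int.mod_eq_emod_of_pos hk']
    exact Int.emod_eq_of_lt (by positivity) (by exact_mod_cast (by omega : j < kn))
  unfold gB
  rw [hmod]
  have hidx : min ((j : Int) - j + kn) (xs.length : Int) - 1 - ((j : Int) - ((j : Int) - j))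
      = ((min kn xs.length - 1 - j : Nat) : Int) := by
    omega
  rw [hidx, PySem.List.pyGetD_natCast]

-- past the first chunk, B's formula shifts onto the dropped list
lemma gB_shift (xs : List Int) (kn : Nat) (hk : 0 < kn) (hlen : kn ≤ xs.length)
    (j : Nat) (hj : j < xs.length - kn) :
    gB xs (kn : Int) ((kn + j : Nat) : Int) = gB (xs.drop kn) (kn : Int) (j : Int) := by
  have hk' : (0 : Int) < (kn : Int) := by exact_mod_cast hk
  have hre : PySem.Int.mod (j : Int) (kn : Int) = (j : Int) % kn :=
    PySem.Int.mod_eq_emod_of_pos hk'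
  have hmodshift : PySem.Int.mod ((kn + j : Nat) : Int) (kn : Int) = (j : Int) % kn := by
    rw [PySem.Int.mod_eq_emod_of_pos hk']
    push_cast
    rw [add_comm]
    simpa using Int.add_mul_emod_self_left (a := (j : Int)) (b := (kn : Int)) (c := 1)
  set r := (j : Int) % (kn : Int) with hrdef
  have hr0 : 0 ≤ r := Int.emod_nonneg _ (by omega)
  have hrlt : r < kn := Int.emod_lt_of_pos _ hk'
  have hrj : r ≤ j := by
    have hdiv := Int.mul_ediv_add_emod (j : Int) (kn : Int)
    have hq : 0 ≤ (j : Int) / kn := Int.ediv_nonneg (by positivity) (by omega)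
    have hm : 0 ≤ (kn : Int) * ((j : Int) / kn) := mul_nonneg (by omega) hq
    omega
  unfold gB
  rw [hmodshift, hre]
  have hdl : ((xs.drop kn).length : Int) = (xs.length : Int) - kn := by
    simp [List.length_drop]
    omega
  rw [hdl]
  set N := (xs.length : Int) with hN
  have hNlk : (kn : Int) ≤ N := by rw [hN]; exact_mod_cast hlen
  have hjN : (j : Int) < N - kn := by
    have : (j : Int) < ((xs.length - kn : Nat) : Int) := by exact_mod_cast hj
    omega
  set e' := min ((j : Int) - r + kn) (N - kn) with he'
  have hmin : min (((kn + j : Nat) : Int) - r + kn) N = kn + e' := by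
    push_cast
    omega
  rw [hmin]
  have hidx : (kn : Int) + e' - 1 - (((kn + j : Nat) : Int) - (((kn + j : Nat) : Int) - r))
      = kn + (e' - 1 - r) := by omega
  rw [hidx]
  set t := e' - 1 - r with ht
  have ht0 : 0 ≤ t := by omega
  have htlt : t < N - kn := by omega
  have hrhs : e' - 1 - ((j : Int) - ((j : Int) - r)) = t := by omega
  rw [hrhs]
  rw [PySem.List.pyGetD_eq_getElem xs 0 (by omega) (by omega),
    PySem.List.pyGetD_eq_getElem (xs.drop kn) 0 (by omega)
      (by rw [hdl]; omega)]
  have htn : ((kn : Int) + t).toNat = kn + t.toNat := by omega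
  simp only [List.getElem_drop, htn]

-- one chunk step of B
lemma solution_alt_step (kn : Nat) (hk : 0 < kn) (xs : List Int) (_hxs : xs ≠ []) :
    solution_alt xs (kn : Int) = (xs.take kn).reverse ++ solution_alt (xs.drop kn) (kn : Int) := by
  rw [alt_eq_map, alt_eq_map]
  have hm : xs.length = min kn xs.length + (xs.length - min kn xs.length) := by omega
  rw [hm, List.range_add, List.map_append]
  congr 1
  · apply List.ext_getElem
    · simp
    · intro i hi hi'
      have him : i < min kn xs.length := by simpa using hi
      simp only [List.getElem_map, List.getElem_range]
      rw [gB_small xs kn hk i him]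
      rw [List.getD_eq_getElem _ _ (by omega), List.getElem_reverse, List.getElem_take]
      simp [List.length_take]
  · rw [List.map_map]
    have hdl : (xs.drop kn).length = xs.length - kn := List.length_drop
    by_cases hcase : kn ≤ xs.length
    · have hm' : min kn xs.length = kn := by omega
      rw [hm', hdl]
      apply List.map_congr_left
      intro j hj
      have hj' : j < xs.length - kn := List.mem_range.mp hj
      exact gB_shift xs kn hk hcase j hj'
    · have h0 : xs.length - min kn xs.length = 0 := by omega
      have h0' : xs.drop kn = [] := List.drop_eq_nil_of_le (by omega)
      simp [h0, h0']

lemma main_eq (kn : Nat) (hk : 0 < kn) :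
    ∀ n xs, xs.length ≤ n → solution xs (kn : Int) = solution_alt xs (kn : Int) := by
  intro n
  induction n with
  | zero =>
      intro xs h
      have : xs = [] := by cases xs <;> simp_all
      subst this
      rw [solution_nil, solution_alt_nil]
  | succ n ih =>
      intro xs h
      rcases eq_or_ne xs [] with rfl | hne
      · rw [solution_nil, solution_alt_nil]
      · have hlen : 0 < xs.length := List.length_pos_iff.mpr hne
        rw [solution_step kn hk xs hne, solution_alt_step kn hk xs hne,
          ih (xs.drop kn) (by simp [List.length_drop]; omega)]

-- ===== VERDICT (by name: the statement is the Claim_ definition above) =====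
theorem solution_spec : Claim_equal_solution := by
  unfold Claim_equal_solution
  intro numbers k _ hpre
  unfold Spec_solution
  rcases hpre with hk | ⟨rfl, hk0⟩
  · obtain ⟨kn, rfl⟩ : ∃ kn : Nat, k = (kn : Int) := ⟨k.toNat, by omega⟩
    exact (main_eq kn (by exact_mod_cast hk) numbers.length numbers le_rfl).symm ▸ rfl
  · rw [solution_nil, solution_alt_nil]

@[simp] theorem solution_raises : Claim_raises_solution := by
  unfold Claim_raises_solution
  refine ⟨?_, by decide, by decide, by decide⟩
  rintro numbers k _ ⟨rfl, rfl⟩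
  unfold Pre_solution
  simp
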